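-- pv_equiv track=rewrite | github.com/rhythmcao/text2sql-graph2tree | preprocess/spider/value_utils.py | remove_names
-- ===== SOURCE A (Python) =====
-- PLACEHOLDER = '##none##'
--
-- def remove_names(question_toks):
--     # first and last may influence the value extraction
--     question = ' '.join(question_toks)
--     replacement = [
--         'first , middle , and last name', 'first , middle , last name', 'first , middle and last name',
--         'first and last name', 'first , last name', 'first name', 'last name'
--     ]
--     replace_func = lambda span: ' '.join([PLACEHOLDER] * len(span.split(' ')))
--     for k in replacement:
--         question = question.replace(k, replace_func(k))
--     return question.split(' ')
-- ===== SOURCE B (Python) =====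
-- PLACEHOLDER = '##none##'
--
-- def remove_names(question_toks):
--     # Single left-to-right scan: at each position try the 7 phrases in priority
--     # order instead of running 7 sequential global str.replace passes.
--     question = ' '.join(question_toks)
--     phrases = [
--         'first , middle , and last name', 'first , middle , last name', 'first , middle and last name',
--         'first and last name', 'first , last name', 'first name', 'last name'
--     ]
--     out = []
--     i = 0
--     n = len(question)
--     while i < n:
--         for p in phrases:
--             if question.startswith(p, i):
--                 out.append(' '.join([PLACEHOLDER] * len(p.split(' '))))
--                 i += len(p)
--                 break
--         else:
--             out.append(question[i])
--             i += 1
--     return ''.join(out).split(' ')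
-- ===== Notes on version B (the rewrite author's own statement) =====
-- stated objective: alternative
-- what changed: A rewrites the joined question with seven sequential global str.replace passes (one per phrase); B makes a single left-to-right scan over the string, trying the seven phrases in priority order at each position and emitting placeholders or the current character.
import Mathlib
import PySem

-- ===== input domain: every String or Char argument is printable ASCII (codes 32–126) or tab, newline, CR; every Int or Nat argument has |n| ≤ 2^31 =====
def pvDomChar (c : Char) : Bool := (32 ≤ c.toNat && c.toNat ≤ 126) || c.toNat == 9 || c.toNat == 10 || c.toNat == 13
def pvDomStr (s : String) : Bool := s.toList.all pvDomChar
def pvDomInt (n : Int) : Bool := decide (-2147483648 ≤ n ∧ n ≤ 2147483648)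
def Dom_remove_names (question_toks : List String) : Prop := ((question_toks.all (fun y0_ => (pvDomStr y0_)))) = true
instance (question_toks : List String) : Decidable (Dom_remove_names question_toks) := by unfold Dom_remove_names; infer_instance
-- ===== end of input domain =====

-- B replaces A's seven sequential global str.replace passes by one left-to-right scan that
-- tries the phrases in priority order at each position (objective: alternative single-pass algorithm).

def pvPlaceholder : String := "##none##"

-- ===== PORT A =====
def pvReplacement : List String :=
  ["first , middle , and last name", "first , middle , last name", "first , middle and last name",
   "first and last name", "first , last name", "first name", "last name"]

-- replace_func = lambda span: ' '.join([PLACEHOLDER] * len(span.split(' ')))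
def pvReplaceFunc (span : String) : String :=
  PySem.Str.join " " (List.replicate ((PySem.Str.split? span " ").getD []).length pvPlaceholder)

def remove_names (question_toks : List String) : List String :=
  let question := PySem.Str.join " " question_toks
  let question := pvReplacement.foldl (fun q k => PySem.Str.replace q k (pvReplaceFunc k)) question
  (PySem.Str.split? question " ").getD []

-- ===== PORT B =====
def pvPhrasesChars : List (List Char) :=
  [['f', 'i', 'r', 's', 't', ' ', ',', ' ', 'm', 'i', 'd', 'd', 'l', 'e', ' ', ',', ' ', 'a', 'n', 'd', ' ', 'l', 'a', 's', 't', ' ', 'n', 'a', 'm', 'e'],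
   ['f', 'i', 'r', 's', 't', ' ', ',', ' ', 'm', 'i', 'd', 'd', 'l', 'e', ' ', ',', ' ', 'l', 'a', 's', 't', ' ', 'n', 'a', 'm', 'e'],
   ['f', 'i', 'r', 's', 't', ' ', ',', ' ', 'm', 'i', 'd', 'd', 'l', 'e', ' ', 'a', 'n', 'd', ' ', 'l', 'a', 's', 't', ' ', 'n', 'a', 'm', 'e'],
   ['f', 'i', 'r', 's', 't', ' ', 'a', 'n', 'd', ' ', 'l', 'a', 's', 't', ' ', 'n', 'a', 'm', 'e'],
   ['f', 'i', 'r', 's', 't', ' ', ',', ' ', 'l', 'a', 's', 't', ' ', 'n', 'a', 'm', 'e'],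
   ['f', 'i', 'r', 's', 't', ' ', 'n', 'a', 'm', 'e'],
   ['l', 'a', 's', 't', ' ', 'n', 'a', 'm', 'e']]

-- ' '.join([PLACEHOLDER] * len(p.split(' '))), on char lists
def pvReplTok (p : List Char) : List Char :=
  PySem.Chars.join [' '] (List.replicate (PySem.Chars.splitOn p [' ']).length pvPlaceholder.toList)

-- the while loop of Source B: first phrase that matches at the current position wins, else copy one char
def pvScanGo : List Char → List Char
  | [] => []
  | c :: t =>
    match pvPhrasesChars.find? (fun p => p.isPrefixOf (c :: t)) with
    | some p => pvReplTok p ++ pvScanGo (List.drop (p.length - 1) t)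
    | none => c :: pvScanGo t
termination_by s => s.length
decreasing_by
  · simp only [List.length_drop, List.length_cons]; omega
  · simp

def remove_names_alt (question_toks : List String) : List String :=
  let question := PySem.Str.join " " question_toks
  (PySem.Str.split? (String.ofList (pvScanGo question.toList)) " ").getD []

-- ===== PRECONDITION & SPEC =====
def Spec_remove_names (question_toks : List String) (out : List String) : Prop := out = remove_names_alt question_toks
instance (question_toks : List String) (out : List String) : Decidable (Spec_remove_names question_toks out) := by unfold Spec_remove_names; infer_instance

-- ===== CLAIM (what is proved, stated in full; the proofs are below) =====
def Claim_equal_remove_names : Prop := ∀ (question_toks : List String), Dom_remove_names question_toks → Spec_remove_names question_toks (remove_names question_toks)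

-- ===== LEMMAS AND PROOFS =====

-- clean structural form of Python str.replace (for old ≠ [])
def pvReplaceAll (p r : List Char) : List Char → List Char
  | [] => []
  | c :: t =>
    if p.isPrefixOf (c :: t) then r ++ pvReplaceAll p r (List.drop (p.length - 1) t)
    else c :: pvReplaceAll p r t
termination_by s => s.length
decreasing_by
  · simp only [List.length_drop, List.length_cons]; omega
  · simp

-- A's whole replacement chain, at char level, over an arbitrary phrase list
def pvFold (L : List (List Char)) (s : List Char) : List Char :=
  L.foldl (fun a p => pvReplaceAll p (pvReplTok p) a) s

theorem pvFold_cons (q : List Char) (L : List (List Char)) (s : List Char) :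
    pvFold (q :: L) s = pvFold L (pvReplaceAll q (pvReplTok q) s) := rfl

theorem pvGo_spec (o : Char) (old' new : List Char) :
    ∀ fuel l acc, l.length ≤ fuel →
      PySem.Chars.replace.go (o :: old') new fuel l acc
        = acc.reverse ++ pvReplaceAll (o :: old') new l := by
  intro fuel
  induction fuel with
  | zero =>
    intro l acc hl
    have hnil : l = [] := by cases l <;> simp_all
    subst hnil
    simp [PySem.Chars.replace.go, pvReplaceAll]
  | succ n ih =>
    intro l acc hl
    match l with
    | [] => simp [PySem.Chars.replace.go, pvReplaceAll]
    | c :: t =>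
      by_cases hpre : (o :: old').isPrefixOf (c :: t)
      · have hdrop : List.drop (o :: old').length (c :: t) = List.drop ((o :: old').length - 1) t := by
          simp [List.drop_succ_cons]
        have hlen : (List.drop (o :: old').length (c :: t)).length ≤ n := by
          simp only [List.length_drop, List.length_cons] at *
          omega
        rw [show PySem.Chars.replace.go (o :: old') new (n+1) (c :: t) acc
              = PySem.Chars.replace.go (o :: old') new n
                  (List.drop (o :: old').length (c :: t)) (new.reverse ++ acc) from by
            simp [PySem.Chars.replace.go, hpre]]
        rw [ih _ _ hlen]
        rw [show pvReplaceAll (o :: old') new (c :: t)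
              = new ++ pvReplaceAll (o :: old') new (List.drop ((o :: old').length - 1) t) from by
            simp [pvReplaceAll, hpre]]
        simp [hdrop]
      · rw [show PySem.Chars.replace.go (o :: old') new (n+1) (c :: t) acc
              = PySem.Chars.replace.go (o :: old') new n t (c :: acc) from by
            simp [PySem.Chars.replace.go, hpre]]
        rw [ih t (c :: acc) (by simp only [List.length_cons] at hl; omega)]
        rw [show pvReplaceAll (o :: old') new (c :: t) = c :: pvReplaceAll (o :: old') new t from by
            simp [pvReplaceAll, hpre]]
        simp

theorem pvReplace_eq (old new s : List Char) (h : old ≠ []) :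
    PySem.Chars.replace s old new = pvReplaceAll old new s := by
  match old, h with
  | o :: old', _ =>
    rw [show PySem.Chars.replace s (o :: old') new
          = PySem.Chars.replace.go (o :: old') new s.length s [] from by
        simp [PySem.Chars.replace]]
    rw [pvGo_spec o old' new s.length s [] le_rfl]
    simp

theorem pvRepl_skip {p : List Char} (r : List Char) {c : Char} {t : List Char}
    (h : ¬ p <+: (c :: t)) : pvReplaceAll p r (c :: t) = c :: pvReplaceAll p r t := by
  rw [show pvReplaceAll p r (c :: t)
        = if p.isPrefixOf (c :: t) then r ++ pvReplaceAll p r (List.drop (p.length - 1) t)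
          else c :: pvReplaceAll p r t from by simp [pvReplaceAll]]
  rw [if_neg (by simpa [List.isPrefixOf_iff_prefix] using h)]

-- a '#'-free prefix of the output of one replace pass is already a prefix of its input
theorem pvPrefix_pullback {p r : List Char} (hr : r.head? = some '#') :
    ∀ n q s, '#' ∉ q → s.length ≤ n → q <+: pvReplaceAll p r s → q <+: s := by
  intro n
  induction n with
  | zero =>
    intro q s hq hl hpre
    have hnil : s = [] := by cases s <;> simp_all
    subst hnil
    simpa [pvReplaceAll] using hpre
  | succ n ih =>
    intro q s hq hl hpre
    match s with
    | [] => simpa [pvReplaceAll] using hpre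
    | c :: t =>
      by_cases hp : p.isPrefixOf (c :: t)
      · rw [show pvReplaceAll p r (c :: t)
              = r ++ pvReplaceAll p r (List.drop (p.length - 1) t) from by
            simp [pvReplaceAll, hp]] at hpre
        match q with
        | [] => exact List.nil_prefix
        | a :: q' =>
          exfalso
          cases r with
          | nil => simp at hr
          | cons b r' =>
            have hb : b = '#' := by simpa using hr
            subst hb
            rw [List.cons_append] at hpre
            have := (List.cons_prefix_cons.mp hpre).1
            subst this
            exact hq (by simp)
      · rw [pvRepl_skip r (by simpa [List.isPrefixOf_iff_prefix] using hp)] at hpre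
        match q with
        | [] => exact List.nil_prefix
        | a :: q' =>
          obtain ⟨rfl, hq'⟩ := List.cons_prefix_cons.mp hpre
          have : q' <+: t := by
            refine ih q' t (fun hmem => hq (by simp [hmem])) ?_ hq'
            simp only [List.length_cons] at hl; omega
          exact List.cons_prefix_cons.mpr ⟨rfl, this⟩

theorem pvRepl_front {p : List Char} (r : List Char) :
    ∀ u w, (∀ j, j < u.length → ¬ p <+: (u.drop j ++ w)) →
      pvReplaceAll p r (u ++ w) = u ++ pvReplaceAll p r w := by
  intro u
  induction u with
  | nil => intro w _; simp
  | cons c u' ih =>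
    intro w hj
    have h0 : ¬ p <+: (c :: (u' ++ w)) := by simpa using hj 0 (by simp)
    rw [List.cons_append, pvRepl_skip r h0,
        ih w (fun j hjlt => by simpa [List.drop_succ_cons] using hj (j+1) (by simpa using Nat.succ_lt_succ hjlt))]
    rfl

theorem pvFold_nil : ∀ L : List (List Char), pvFold L [] = [] := by
  intro L
  induction L with
  | nil => rfl
  | cons q L ih => rw [pvFold_cons, show pvReplaceAll q (pvReplTok q) [] = [] from by simp [pvReplaceAll], ih]

theorem pvFold_skip :
    ∀ L : List (List Char), (∀ q ∈ L, '#' ∉ q ∧ (pvReplTok q).head? = some '#') →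
    ∀ c t, (∀ q ∈ L, ¬ q <+: (c :: t)) → pvFold L (c :: t) = c :: pvFold L t := by
  intro L
  induction L with
  | nil => intro _ c t _; rfl
  | cons q L ih =>
    intro hL c t hnp
    have hq := hL q (by simp)
    have hstep : pvReplaceAll q (pvReplTok q) (c :: t) = c :: pvReplaceAll q (pvReplTok q) t :=
      pvRepl_skip _ (hnp q (by simp))
    rw [pvFold_cons, hstep, pvFold_cons]
    refine ih (fun x hx => hL x (by simp [hx])) c _ (fun q' hq' hpre => ?_)
    have hpre' : q' <+: pvReplaceAll q (pvReplTok q) (c :: t) := by rw [hstep]; exact hpre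
    exact hnp q' (by simp [hq'])
      (pvPrefix_pullback hq.2 (c :: t).length q' (c :: t) (hL q' (by simp [hq'])).1 le_rfl hpre')

theorem pvFold_front :
    ∀ (L : List (List Char)) (u : List Char),
      (∀ q ∈ L, q ≠ [] ∧ ∀ h' ∈ u, q.head? ≠ some h') →
      ∀ w, pvFold L (u ++ w) = u ++ pvFold L w := by
  intro L
  induction L with
  | nil => intro u _ w; rfl
  | cons q L ih =>
    intro u hL w
    have hq := hL q (by simp)
    have hstep : pvReplaceAll q (pvReplTok q) (u ++ w) = u ++ pvReplaceAll q (pvReplTok q) w := by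
      refine pvRepl_front _ u w (fun j hj hpre => ?_)
      match q, hq.1 with
      | a :: q₂, _ =>
        rw [List.drop_eq_getElem_cons hj, List.cons_append] at hpre
        have ha := (List.cons_prefix_cons.mp hpre).1
        exact hq.2 a (ha ▸ List.getElem_mem hj) rfl
    rw [pvFold_cons, hstep, pvFold_cons]
    exact ih u (fun x hx => hL x (by simp [hx])) _

theorem pvFold_pre :
    ∀ (L : List (List Char)) (p : List Char), p ≠ [] → 'f' ∉ p.drop 1 →
      (∀ q ∈ L, '#' ∉ q ∧ (pvReplTok q).head? = some '#' ∧ q.head? = some 'f') →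
      ∀ w, (∀ q ∈ L, ¬ q <+: p ++ w) → pvFold L (p ++ w) = p ++ pvFold L w := by
  intro L
  induction L with
  | nil => intro p _ _ _ w _; rfl
  | cons q L ih =>
    intro p hp hpf hL w hnp
    have hq := hL q (by simp)
    have hstep : pvReplaceAll q (pvReplTok q) (p ++ w) = p ++ pvReplaceAll q (pvReplTok q) w := by
      refine pvRepl_front _ p w (fun j hj hpre => ?_)
      rcases Nat.eq_zero_or_pos j with hj0 | hj1
      · subst hj0
        exact hnp q (by simp) (by simpa using hpre)
      · have hf : q.head? = some 'f' := hq.2.2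
        cases q with
        | nil => simp at hf
        | cons b q₂ =>
          have hb : b = 'f' := by simpa using hf
          subst hb
          rw [List.drop_eq_getElem_cons hj, List.cons_append] at hpre
          have ha := (List.cons_prefix_cons.mp hpre).1
          refine hpf ?_
          have : p[j] ∈ p.drop 1 := by
            rw [show p[j] = (p.drop 1)[j-1]'(by simp; omega) from by
              rw [List.getElem_drop]; congr 1; omega]
            exact List.getElem_mem _
          rwa [← ha] at this
    rw [pvFold_cons, hstep, pvFold_cons]
    refine ih p hp hpf (fun x hx => hL x (by simp [hx])) _ (fun q' hq' hpre => ?_)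
    have hpre' : q' <+: pvReplaceAll q (pvReplTok q) (p ++ w) := by rw [hstep]; exact hpre
    exact hnp q' (by simp [hq'])
      (pvPrefix_pullback hq.2.1 (p ++ w).length q' (p ++ w) (hL q' (by simp [hq'])).1 le_rfl hpre')

theorem pvSplitGo_ne_nil (sep : List Char) :
    ∀ fuel l cur acc, PySem.Chars.splitOn.go sep fuel l cur acc ≠ [] := by
  intro fuel
  induction fuel with
  | zero => intro l cur acc; simp [PySem.Chars.splitOn.go]
  | succ n ih =>
    intro l cur acc
    match l with
    | [] => simp [PySem.Chars.splitOn.go]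
    | c :: rest =>
      rw [show PySem.Chars.splitOn.go sep (n+1) (c :: rest) cur acc
            = if sep.isPrefixOf (c :: rest) then
                PySem.Chars.splitOn.go sep n (List.drop sep.length (c :: rest)) [] (cur.reverse :: acc)
              else PySem.Chars.splitOn.go sep n rest (c :: cur) acc from by
          simp [PySem.Chars.splitOn.go]]
      split
      · apply ih
      · apply ih

theorem pvSplitOn_ne_nil (s sep : List Char) : PySem.Chars.splitOn s sep ≠ [] := by
  unfold PySem.Chars.splitOn
  apply pvSplitGo_ne_nil

theorem pvPh_chars : pvPlaceholder.toList = ['#', '#', 'n', 'o', 'n', 'e', '#', '#'] := by decide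

theorem pvPh_mem : ∀ c ∈ pvPlaceholder.toList, c ∈ [' ', '#', 'n', 'o', 'e'] := by
  rw [pvPh_chars]; intro c hc; fin_cases hc <;> decide

theorem pvJoinHead : ∀ m, (PySem.Chars.join [' '] (List.replicate (m+1) pvPlaceholder.toList)).head? = some '#' := by
  intro m
  cases m with
  | zero =>
    rw [show List.replicate 1 pvPlaceholder.toList = [pvPlaceholder.toList] from rfl,
        PySem.Chars.join_singleton, pvPh_chars]
    rfl
  | succ k =>
    rw [List.replicate_succ, List.replicate_succ, PySem.Chars.join_cons_cons, pvPh_chars]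
    rfl

theorem pvJoinMem : ∀ m, ∀ c ∈ PySem.Chars.join [' '] (List.replicate m pvPlaceholder.toList),
    c ∈ [' ', '#', 'n', 'o', 'e'] := by
  intro m
  induction m with
  | zero => intro c hc; simp [PySem.Chars.join_nil] at hc
  | succ k ih =>
    intro c hc
    cases k with
    | zero =>
      rw [show List.replicate 1 pvPlaceholder.toList = [pvPlaceholder.toList] from rfl,
          PySem.Chars.join_singleton] at hc
      exact pvPh_mem c hc
    | succ k' =>
      rw [List.replicate_succ, List.replicate_succ, PySem.Chars.join_cons_cons,
          ← List.replicate_succ] at hc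
      rcases List.mem_append.mp hc with hc1 | hc2
      · rcases List.mem_append.mp hc1 with hc3 | hc4
        · exact pvPh_mem c hc3
        · simp at hc4; simp [hc4]
      · exact ih c hc2

theorem pvTok_facts (p : List Char) :
    (pvReplTok p).head? = some '#' ∧ ∀ h' ∈ pvReplTok p, h' ∈ [' ', '#', 'n', 'o', 'e'] := by
  constructor
  · unfold pvReplTok
    obtain ⟨m, hm⟩ : ∃ m, (PySem.Chars.splitOn p [' ']).length = m + 1 := by
      have hne := pvSplitOn_ne_nil p [' ']
      have : (PySem.Chars.splitOn p [' ']).length ≠ 0 := by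
        simpa [List.length_eq_zero_iff] using hne
      exact ⟨(PySem.Chars.splitOn p [' ']).length - 1, by omega⟩
    rw [hm]
    exact pvJoinHead m
  · intro h' hh'
    exact pvJoinMem _ h' hh'

set_option maxRecDepth 100000 in
theorem pvPhrase_facts : ∀ p ∈ pvPhrasesChars,
    p ≠ [] ∧ '#' ∉ p ∧ 'f' ∉ p.drop 1 ∧ (p.head? = some 'f' ∨ p.head? = some 'l') := by decide

set_option maxRecDepth 100000 in
theorem pvLast_facts : ∀ q ∈ pvPhrasesChars.dropLast, q.head? = some 'f' := by decide

theorem pvScanGo_nil : pvScanGo [] = [] := by rw [pvScanGo]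

theorem pvMain : ∀ n s, s.length ≤ n → pvFold pvPhrasesChars s = pvScanGo s := by
  intro n
  induction n with
  | zero =>
    intro s hl
    have hnil : s = [] := by cases s <;> simp_all
    subst hnil
    rw [pvFold_nil, pvScanGo_nil]
  | succ n ih =>
    intro s hl
    match s with
    | [] => rw [pvFold_nil, pvScanGo_nil]
    | c :: t =>
      rcases hfind : pvPhrasesChars.find? (fun p => p.isPrefixOf (c :: t)) with _ | p
      · have hnone := List.find?_eq_none.mp hfind
        have hnp : ∀ q ∈ pvPhrasesChars, ¬ q <+: (c :: t) := by
          intro q hq hpre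
          exact hnone q hq (by simpa [List.isPrefixOf_iff_prefix] using hpre)
        rw [pvFold_skip pvPhrasesChars
              (fun q hq => ⟨(pvPhrase_facts q hq).2.1, (pvTok_facts q).1⟩) c t hnp,
            ih t (by simp only [List.length_cons] at hl; omega)]
        rw [show pvScanGo (c :: t) = c :: pvScanGo t from by
          rw [pvScanGo]; rw [hfind]]
      · obtain ⟨hpred, L, R, hsplit, hLfalse⟩ := List.find?_eq_some_iff_append.mp hfind
        have hppre : p <+: c :: t := List.isPrefixOf_iff_prefix.mp hpred
        obtain ⟨w, hw⟩ := hppre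
        have hpmem : p ∈ pvPhrasesChars := by rw [hsplit]; simp
        have hpfact := pvPhrase_facts p hpmem
        have hLmem : ∀ q ∈ L, q ∈ pvPhrasesChars := by
          intro q hq; rw [hsplit]; simp [hq]
        have hLhead : ∀ q ∈ L, q.head? = some 'f' := by
          intro q hq
          refine pvLast_facts q ?_
          rw [hsplit, List.dropLast_append_cons]
          exact List.mem_append_left _ hq
        have hLnp : ∀ q ∈ L, ¬ q <+: p ++ w := by
          intro q hq hpre
          have := hLfalse q hq
          rw [hw] at hpre
          simp [List.isPrefixOf_iff_prefix.mpr hpre] at this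
        -- the fold over the full phrase list, split at p
        have e1 : ∀ x, pvFold pvPhrasesChars x = pvFold R (pvReplaceAll p (pvReplTok p) (pvFold L x)) := by
          intro x
          rw [hsplit]
          simp [pvFold, List.foldl_append]
        have e2 : pvFold L (p ++ w) = p ++ pvFold L w :=
          pvFold_pre L p hpfact.1 hpfact.2.2.1
            (fun q hq => ⟨(pvPhrase_facts q (hLmem q hq)).2.1, (pvTok_facts q).1, hLhead q hq⟩)
            w hLnp
        have e3 : ∀ X, pvReplaceAll p (pvReplTok p) (p ++ X)
            = pvReplTok p ++ pvReplaceAll p (pvReplTok p) X := by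
          intro X
          match p, hpfact.1 with
          | a :: p', _ =>
            rw [List.cons_append,
                show pvReplaceAll (a :: p') (pvReplTok (a :: p')) (a :: (p' ++ X))
                  = if (a :: p').isPrefixOf (a :: (p' ++ X)) then
                      pvReplTok (a :: p') ++ pvReplaceAll (a :: p') (pvReplTok (a :: p'))
                        (List.drop ((a :: p').length - 1) (p' ++ X))
                    else a :: pvReplaceAll (a :: p') (pvReplTok (a :: p')) (p' ++ X) from by
                  simp [pvReplaceAll]]
            rw [if_pos (by simp [List.isPrefixOf_iff_prefix, List.prefix_append])]
            simp [List.drop_left]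
        have e4 : ∀ Y, pvFold R (pvReplTok p ++ Y) = pvReplTok p ++ pvFold R Y := by
          intro Y
          refine pvFold_front R (pvReplTok p) (fun q hq => ?_) Y
          have hqmem : q ∈ pvPhrasesChars := by rw [hsplit]; simp [hq]
          refine ⟨(pvPhrase_facts q hqmem).1, fun h' hh' hhead => ?_⟩
          have hin := (pvTok_facts p).2 h' hh'
          rcases (pvPhrase_facts q hqmem).2.2.2 with hf | hf <;>
            rw [hhead] at hf <;> simp_all <;> rcases hin with rfl | rfl | rfl | rfl <;> simp_all
        have hwlen : w.length ≤ n := by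
          have := congrArg List.length hw
          simp only [List.length_append, List.length_cons] at this hl
          have hplen : 1 ≤ p.length := by
            match p, hpfact.1 with | a :: p', _ => simp
          omega
        have hscan : pvScanGo (c :: t) = pvReplTok p ++ pvScanGo (List.drop (p.length - 1) t) := by
          rw [pvScanGo]; rw [hfind]
        have hdropw : List.drop (p.length - 1) t = w := by
          have hw' := hw
          match p, hpfact.1, hw' with
          | a :: p', _, hw' =>
            rw [List.cons_append] at hw'
            injection hw' with h1 h2
            rw [← h2]
            simp
        calc pvFold pvPhrasesChars (c :: t)
            = pvFold R (pvReplaceAll p (pvReplTok p) (pvFold L (p ++ w))) := by rw [← hw, e1]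
          _ = pvFold R (pvReplaceAll p (pvReplTok p) (p ++ pvFold L w)) := by rw [e2]
          _ = pvFold R (pvReplTok p ++ pvReplaceAll p (pvReplTok p) (pvFold L w)) := by rw [e3]
          _ = pvReplTok p ++ pvFold R (pvReplaceAll p (pvReplTok p) (pvFold L w)) := by rw [e4]
          _ = pvReplTok p ++ pvFold pvPhrasesChars w := by rw [e1]
          _ = pvReplTok p ++ pvScanGo w := by rw [ih w hwlen]
          _ = pvScanGo (c :: t) := by rw [hscan, hdropw]

theorem pvRf_toList (k : String) : (pvReplaceFunc k).toList = pvReplTok k.toList := by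
  simp [pvReplaceFunc, pvReplTok, PySem.Str.toList_join, PySem.Str.split?, PySem.Chars.split?,
    List.map_replicate]

theorem pvChain_toList : ∀ (ks : List String) (q : String),
    (ks.foldl (fun q k => PySem.Str.replace q k (pvReplaceFunc k)) q).toList =
      ks.foldl (fun a k => PySem.Chars.replace a k.toList (pvReplaceFunc k).toList) q.toList := by
  intro ks
  induction ks with
  | nil => intro q; rfl
  | cons k ks ih =>
    intro q
    simp only [List.foldl_cons]
    rw [ih, PySem.Str.toList_replace]

theorem pvLift : ∀ (ks : List String), (∀ k ∈ ks, k.toList ≠ []) →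
    ∀ s, ks.foldl (fun a k => PySem.Chars.replace a k.toList (pvReplaceFunc k).toList) s
      = pvFold (ks.map String.toList) s := by
  intro ks
  induction ks with
  | nil => intro _ s; rfl
  | cons k ks ih =>
    intro h s
    simp only [List.foldl_cons, List.map_cons]
    rw [pvReplace_eq _ _ _ (h k (by simp)), pvRf_toList, pvFold_cons]
    exact ih (fun x hx => h x (by simp [hx])) _

set_option maxRecDepth 100000 in
theorem pvMap_phrases : pvReplacement.map String.toList = pvPhrasesChars := by decide

-- ===== VERDICT (by name: the statement is the Claim_ definition above) =====
set_option maxRecDepth 100000 in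
theorem remove_names_spec : Claim_equal_remove_names := by
  intro toks _
  unfold Spec_remove_names remove_names remove_names_alt
  have h2 := pvChain_toList pvReplacement (PySem.Str.join " " toks)
  rw [pvLift pvReplacement (fun k hk => (pvPhrase_facts k.toList (by rw [← pvMap_phrases]; exact List.mem_map_of_mem hk)).1) _, pvMap_phrases,
      pvMain (PySem.Str.join " " toks).toList.length _ le_rfl] at h2
  have h1 : (pvReplacement.foldl (fun q k => PySem.Str.replace q k (pvReplaceFunc k))
      (PySem.Str.join " " toks)) =
      String.ofList (pvScanGo (PySem.Str.join " " toks).toList) := by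
    rw [← h2]
    simp
  simp only [h1]
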